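-- pv_equiv track=rewrite | github.com/snowbagoly/adventofcode2015 | day17.py | add_container
-- ===== SOURCE A (Python) =====
-- TARGET_SUM = 150
--
-- def add_container(containers, indexes_used, sum_so_far, index_to_add):
-- 	new_sum_so_far = sum_so_far+containers[index_to_add]
-- 	new_indexes_used = indexes_used+(index_to_add,)
-- 	if new_sum_so_far == TARGET_SUM:
-- 		return [new_indexes_used]
-- 	elif new_sum_so_far > TARGET_SUM:
-- 		return []
-- 	else:
-- 		# If we still have free space, trying to add all following containers (might worth to order the
-- 		# container sizes desc, so we could find with a binary search where to start the adding, but we don't really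
-- 		# have that many elements)
-- 		return [solution for i in range(index_to_add+1, len(containers)) \
-- 		        for solution in add_container(containers, new_indexes_used, new_sum_so_far, i)]
-- ===== SOURCE B (Python) =====
-- TARGET_SUM = 150
--
-- def add_container(containers, indexes_used, sum_so_far, index_to_add):
--     # take/skip binary recursion over the suffix instead of A's loop-over-next-index
--     n = len(containers)
--     def go(used, s, j):
--         # solutions obtainable by choosing indices from j..n-1 (ascending) on top of (used, s)
--         if j >= n:
--             return []
--         ns = s + containers[j]
--         if ns == TARGET_SUM:
--             take = [used + (j,)]
--         elif ns > TARGET_SUM: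
--             take = []
--         else:
--             take = go(used + (j,), ns, j + 1)
--         return take + go(used, s, j + 1)
--     new_sum = sum_so_far + containers[index_to_add]
--     new_used = indexes_used + (index_to_add,)
--     if new_sum == TARGET_SUM:
--         return [new_used]
--     if new_sum > TARGET_SUM:
--         return []
--     return go(new_used, new_sum, index_to_add + 1)
-- ===== Notes on version B (the rewrite author's own statement) =====
-- stated objective: alternative
-- what changed: Replaces A's recursive call fanning out over all later start indices via a range comprehension by a take/skip binary recursion over the suffix of containers (each step either takes the next index or skips it), producing the identical solution list and order.
import Mathlib
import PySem

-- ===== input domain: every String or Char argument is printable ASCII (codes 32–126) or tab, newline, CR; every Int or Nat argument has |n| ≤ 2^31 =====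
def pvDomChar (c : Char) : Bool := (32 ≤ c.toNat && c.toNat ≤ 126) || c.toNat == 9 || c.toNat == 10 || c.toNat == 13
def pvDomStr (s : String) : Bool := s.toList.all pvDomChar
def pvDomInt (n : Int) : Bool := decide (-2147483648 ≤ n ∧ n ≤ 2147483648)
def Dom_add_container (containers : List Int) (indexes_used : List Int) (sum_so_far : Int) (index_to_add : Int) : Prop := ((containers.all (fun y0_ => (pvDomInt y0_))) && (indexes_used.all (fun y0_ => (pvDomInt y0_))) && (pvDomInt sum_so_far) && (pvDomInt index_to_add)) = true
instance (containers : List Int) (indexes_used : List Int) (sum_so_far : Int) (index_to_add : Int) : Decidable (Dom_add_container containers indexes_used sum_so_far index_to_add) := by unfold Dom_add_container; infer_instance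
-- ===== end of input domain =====

-- B replaces A's per-node loop over all later start indices by a take/skip binary recursion
-- over the suffix of containers (objective: alternative decomposition, same cost, same output order).
-- Both ports carry a Nat fuel solely as a termination guard; the fuel supplied at the top is
-- always sufficient, so it never changes the computed value.

-- ===== PORT A =====
-- fuel bounds the recursion depth only (each nested call has a strictly larger index)
def add_container_go (containers : List Int) (fuel : Nat) (indexes_used : List Int) (sum_so_far : Int) (index_to_add : Int) : List (List Int) :=
  match PySem.List.pyGet? containers index_to_add with
  | none => []  -- Python raises IndexError here; excluded by Pre_
  | some c =>
    let new_sum_so_far := sum_so_far + c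
    let new_indexes_used := indexes_used ++ [index_to_add]
    if new_sum_so_far = 150 then [new_indexes_used]
    else if new_sum_so_far > 150 then []
    else
      match fuel with
      | 0 => []  -- never reached: the supplied fuel dominates the recursion depth
      | fuel + 1 =>
        (PySem.List.pyRange (index_to_add + 1) (containers.length : Int) 1).flatMap
          (fun i => add_container_go containers fuel new_indexes_used new_sum_so_far i)

def add_container (containers : List Int) (indexes_used : List Int) (sum_so_far : Int) (index_to_add : Int) : List (List Int) :=
  add_container_go containers ((containers.length : Int) - index_to_add).toNat indexes_used sum_so_far index_to_add

-- ===== PORT B =====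
-- helper 'go' of Source B: solutions obtainable by choosing indices from j..n-1 on top of (used, s);
-- fuel bounds the recursion depth only (j strictly increases towards n)
def go_alt (containers : List Int) (fuel : Nat) (used : List Int) (s : Int) (j : Int) : List (List Int) :=
  if (containers.length : Int) ≤ j then []
  else
    match fuel with
    | 0 => []  -- never reached: the supplied fuel dominates the recursion depth
    | fuel + 1 =>
      let take : List (List Int) :=
        match PySem.List.pyGet? containers j with
        | none => []  -- Python raises IndexError here; unreachable from Pre_ inputs
        | some c =>
          let ns := s + c
          if ns = 150 then [used ++ [j]]
          else if ns > 150 then []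
          else go_alt containers fuel (used ++ [j]) ns (j + 1)
      take ++ go_alt containers fuel used s (j + 1)

def add_container_alt (containers : List Int) (indexes_used : List Int) (sum_so_far : Int) (index_to_add : Int) : List (List Int) :=
  match PySem.List.pyGet? containers index_to_add with
  | none => []  -- Python raises IndexError here; excluded by Pre_
  | some c =>
    let new_sum := sum_so_far + c
    let new_used := indexes_used ++ [index_to_add]
    if new_sum = 150 then [new_used]
    else if new_sum > 150 then []
    else go_alt containers ((containers.length : Int) - index_to_add).toNat new_used new_sum (index_to_add + 1)

-- ===== PRECONDITION & SPEC =====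
-- Pre_ excludes exactly the inputs where Python A raises IndexError (index_to_add out of range).
def Pre_add_container (containers : List Int) (indexes_used : List Int) (sum_so_far : Int) (index_to_add : Int) : Prop :=
  PySem.Raise.InRange containers.length index_to_add
instance (containers : List Int) (indexes_used : List Int) (sum_so_far : Int) (index_to_add : Int) : Decidable (Pre_add_container containers indexes_used sum_so_far index_to_add) := by unfold Pre_add_container; infer_instance

def pvWitness_add_container : List Int × List Int × Int × Int := ([100, 50, 25, 25, 50], [], 0, 0)

def Spec_add_container (containers : List Int) (indexes_used : List Int) (sum_so_far : Int) (index_to_add : Int) (out : List (List Int)) : Prop := out = add_container_alt containers indexes_used sum_so_far index_to_add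
instance (containers : List Int) (indexes_used : List Int) (sum_so_far : Int) (index_to_add : Int) (out : List (List Int)) : Decidable (Spec_add_container containers indexes_used sum_so_far index_to_add out) := by unfold Spec_add_container; infer_instance

-- ===== CLAIM (what is proved, stated in full; the proofs are below) =====
def Claim_equal_add_container : Prop := ∀ (containers : List Int) (indexes_used : List Int) (sum_so_far : Int) (index_to_add : Int), Dom_add_container containers indexes_used sum_so_far index_to_add → Pre_add_container containers indexes_used sum_so_far index_to_add → Spec_add_container containers indexes_used sum_so_far index_to_add (add_container containers indexes_used sum_so_far index_to_add)

-- ===== LEMMAS AND PROOFS =====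
-- go_alt from j (with adequate fuels on both sides) equals A's flatMap of add_container_go over range(j, len)
lemma go_alt_eq (containers : List Int) :
    ∀ (fb fa : Nat) (used : List Int) (s j : Int),
      ((containers.length : Int) - j).toNat ≤ fb →
      ((containers.length : Int) - j).toNat ≤ fa + 1 →
    go_alt containers fb used s j
      = (PySem.List.pyRange j (containers.length : Int) 1).flatMap
          (fun i => add_container_go containers fa used s i) := by
  intro fb
  induction fb with
  | zero =>
    intro fa used s j hb _
    have hj : (containers.length : Int) ≤ j := by omega
    rw [go_alt, if_pos hj, PySem.List.pyRange_one_eq_nil hj, List.flatMap_nil]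
  | succ fb ih =>
    intro fa used s j hb ha
    by_cases hj : (containers.length : Int) ≤ j
    · rw [go_alt, if_pos hj, PySem.List.pyRange_one_eq_nil hj, List.flatMap_nil]
    · have hjl : j < (containers.length : Int) := by omega
      rw [go_alt, if_neg hj, PySem.List.pyRange_one_cons hjl, List.flatMap_cons, add_container_go]
      cases fa with
      | zero =>
        -- fuel 1 on the left, 0 on the right: j is the last possible index (j = len - 1)
        have hlast : (containers.length : Int) ≤ j + 1 := by omega
        rw [ih 0 used s (j + 1) (by omega) (by omega),
            PySem.List.pyRange_one_eq_nil hlast, List.flatMap_nil, List.append_nil, List.append_nil]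
        cases PySem.List.pyGet? containers j with
        | none => rfl
        | some c =>
          simp only
          split_ifs with h1 h2
          · rfl
          · rfl
          · rw [go_alt.eq_def, if_pos hlast]
      | succ fa =>
        rw [ih (fa + 1) used s (j + 1) (by omega) (by omega)]
        cases PySem.List.pyGet? containers j with
        | none => rfl
        | some c =>
          simp only
          split_ifs with h1 h2
          · rfl
          · rfl
          · rw [ih fa (used ++ [j]) (s + c) (j + 1) (by omega) (by omega)]

-- ===== VERDICT (by name: the statement is the Claim_ definition above) =====
theorem add_container_spec : Claim_equal_add_container := by
  intro containers indexes_used sum_so_far index_to_add _ hpre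
  have hrange : -(containers.length : Int) ≤ index_to_add ∧ index_to_add < (containers.length : Int) := by
    simpa [PySem.Raise.InRange] using hpre
  unfold Spec_add_container add_container_alt add_container
  rw [add_container_go]
  cases PySem.List.pyGet? containers index_to_add with
  | none => rfl
  | some c =>
    simp only
    split_ifs with h1 h2
    · rfl
    · rfl
    · have hfuel : ((containers.length : Int) - index_to_add).toNat
          = (((containers.length : Int) - index_to_add).toNat - 1) + 1 := by omega
      rw [hfuel]
      exact (go_alt_eq containers _ _ _ _ _ (by omega) (by omega)).symm
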